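-- pv_equiv track=rewrite | github.com/khl6235/AlgorithmStudy | src/PythonAlgo/2021_Feb/0208_3.py | solution
-- ===== SOURCE A (Python) =====
-- def solution(n):
--     answer = []
--     q = n
--     while(q > 0):
--         m = q%10
--         q = q//10
--         answer.append(m)
--     return answer
-- ===== SOURCE B (Python) =====
-- def solution(n):
--     if n <= 0:
--         return []
--     return [int(c) for c in reversed(str(n))]
-- ===== Notes on version B (the rewrite author's own statement) =====
-- stated objective: idiomatic
-- what changed: B converts n to its decimal string and maps the reversed characters to digits, instead of A's while-loop of repeated floor-division and modulo with list appends.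
import Mathlib
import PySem

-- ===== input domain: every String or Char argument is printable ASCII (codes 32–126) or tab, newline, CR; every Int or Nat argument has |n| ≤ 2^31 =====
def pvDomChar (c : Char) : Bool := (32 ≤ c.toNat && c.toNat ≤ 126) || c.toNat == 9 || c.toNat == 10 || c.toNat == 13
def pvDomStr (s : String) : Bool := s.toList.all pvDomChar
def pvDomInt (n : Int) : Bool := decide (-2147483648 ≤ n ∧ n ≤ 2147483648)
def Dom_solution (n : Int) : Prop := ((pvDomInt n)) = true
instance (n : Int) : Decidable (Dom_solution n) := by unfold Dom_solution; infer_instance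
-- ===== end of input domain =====

-- B lists the digits of n via its decimal string instead of A's divide-and-mod loop (idiomatic, same cost).

-- ===== PORT A =====
-- the while-loop: q > 0 → append q%10, q := q//10
def solutionGo (q : Int) (answer : List Int) : List Int :=
  if _h : 0 < q then
    solutionGo (PySem.Int.floordiv q 10) (answer ++ [PySem.Int.mod q 10])
  else answer
termination_by q.toNat
decreasing_by
  simp only [PySem.Int.floordiv]
  rw [Int.fdiv_eq_ediv, if_pos (Or.inl (by omega) : (0:Int) ≤ 10 ∨ (10:Int) ∣ q)]
  omega

def solution (n : Int) : List Int := solutionGo n []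

-- ===== PORT B =====
-- int(c) for a single decimal-digit character c equals its code minus 48; exact here since
-- str(n) for n > 0 consists only of the characters '0'-'9'.
def solution_alt (n : Int) : List Int :=
  if n ≤ 0 then []
  else ((PySem.Int.toStr n).toList.reverse).map (fun c => ((c.toNat : Int) - 48))

-- ===== PRECONDITION & SPEC =====
def Spec_solution (n : Int) (out : List Int) : Prop := out = solution_alt n
instance (n : Int) (out : List Int) : Decidable (Spec_solution n out) := by unfold Spec_solution; infer_instance

-- ===== CLAIM (what is proved, stated in full; the proofs are below) =====
def Claim_equal_solution : Prop := ∀ (n : Int), Dom_solution n → Spec_solution n (solution n)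

-- ===== LEMMAS AND PROOFS =====

-- least-significant-first decimal digits of a natural number (natDigits 0 = [0])
def natDigits (m : Nat) : List Nat :=
  m % 10 :: (if h : m / 10 = 0 then [] else natDigits (m / 10))
termination_by m
decreasing_by exact Nat.div_lt_self (by omega) (by omega)

theorem toDigitsCore_eq (fuel : Nat) : ∀ (m : Nat) (ds : List Char), m < fuel →
    Nat.toDigitsCore 10 fuel m ds = ((natDigits m).map Nat.digitChar).reverse ++ ds := by
  induction fuel with
  | zero => intro m ds h; omega
  | succ f ih =>
    intro m ds h
    rw [Nat.toDigitsCore, natDigits]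
    by_cases h0 : m / 10 = 0
    · simp [h0]
    · simp only [h0, if_false]
      rw [ih (m / 10) _ (by omega)]
      simp

theorem natDigits_lt (m : Nat) : ∀ d ∈ natDigits m, d < 10 := by
  induction m using Nat.strong_induction_on with
  | _ m ih =>
    intro d hd
    rw [natDigits] at hd
    rcases List.mem_cons.mp hd with h | h
    · omega
    · by_cases h0 : m / 10 = 0
      · simp [h0] at h
      · simp only [dif_neg h0] at h
        exact ih (m / 10) (Nat.div_lt_self (by omega) (by omega)) d h

theorem digitChar_inv (d : Nat) (hd : d < 10) :
    ((Nat.digitChar d).toNat : Int) - 48 = (d : Int) := by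
  interval_cases d <;> decide

theorem alt_eq (n : Int) (hn : 0 < n) :
    solution_alt n = (natDigits n.toNat).map (fun (d : Nat) => (d : Int)) := by
  rw [solution_alt, if_neg (by omega)]
  have htc : PySem.Int.toChars n = ((natDigits n.toNat).map Nat.digitChar).reverse := by
    rw [PySem.Int.toChars, if_neg (by omega), Nat.toDigits,
      toDigitsCore_eq _ _ _ (Nat.lt_succ_self _), List.append_nil]
  rw [show (PySem.Int.toStr n).toList = PySem.Int.toChars n from PySem.Int.toList_toStr n,
    htc, List.reverse_reverse, List.map_map]
  refine List.map_congr_left fun d hd => ?_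
  simpa using digitChar_inv d (natDigits_lt _ d hd)

theorem fdiv_pos_eq (q : Int) (hq : 0 < q) :
    PySem.Int.floordiv q 10 = ((q.toNat / 10 : Nat) : Int) := by
  simp only [PySem.Int.floordiv]
  rw [Int.fdiv_eq_ediv, if_pos (Or.inl (by omega) : (0:Int) ≤ 10 ∨ (10:Int) ∣ q)]
  omega

theorem fmod_pos_eq (q : Int) (hq : 0 < q) :
    PySem.Int.mod q 10 = ((q.toNat % 10 : Nat) : Int) := by
  simp only [PySem.Int.mod]
  rw [Int.fmod_eq_emod, if_pos (Or.inl (by omega) : (0:Int) ≤ 10 ∨ (10:Int) ∣ q)]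
  omega

theorem go_eq (fuel : Nat) : ∀ (q : Int) (answer : List Int), q.toNat ≤ fuel →
    solutionGo q answer =
      answer ++ (if 0 < q then (natDigits q.toNat).map (fun (d : Nat) => (d : Int)) else []) := by
  induction fuel with
  | zero =>
    intro q answer hle
    rw [solutionGo]
    have hq : ¬ 0 < q := by omega
    rw [dif_neg hq, if_neg hq, List.append_nil]
  | succ f ih =>
    intro q answer hle
    rw [solutionGo]
    by_cases hq : 0 < q
    · rw [dif_pos hq, fdiv_pos_eq q hq, fmod_pos_eq q hq,
        ih _ _ (by omega), if_pos hq]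
      have h2 : (((q.toNat / 10 : Nat) : Int)).toNat = q.toNat / 10 := by omega
      rw [h2]
      by_cases h0 : q.toNat / 10 = 0
      · have hneg : ¬ (0:Int) < ((q.toNat / 10 : Nat) : Int) := by omega
        rw [if_neg hneg, List.append_nil]
        conv_rhs => rw [natDigits]
        rw [dif_pos h0]
        simp
      · have h1 : (0:Int) < ((q.toNat / 10 : Nat) : Int) := by omega
        rw [if_pos h1, List.append_assoc]
        conv_rhs => rw [natDigits]
        rw [dif_neg h0]
        simp
    · rw [dif_neg hq, if_neg hq, List.append_nil]

theorem solution_eq_alt (n : Int) : solution n = solution_alt n := by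
  by_cases hn : 0 < n
  · rw [solution, go_eq n.toNat n [] le_rfl, if_pos hn, alt_eq n hn, List.nil_append]
  · rw [solution, go_eq n.toNat n [] le_rfl, if_neg hn, solution_alt, if_pos (by omega)]
    rfl

-- ===== VERDICT (by name: the statement is the Claim_ definition above) =====
theorem solution_spec : Claim_equal_solution := by
  intro n _
  exact solution_eq_alt n
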